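-- pv_equiv track=rewrite | github.com/coding-samu/Algo2 | dynamicProgrammingMethods.py | riempiDisco
-- ===== SOURCE A (Python) =====
-- def riempiDisco(A,C):
--     n = len(A)
--     T = [[0]*(C+1) for i in range(n+1)]
--     for i in range(1,n+1):
--         for c in range(C+1):
--             if c < A[i-1]:
--                 T[i][c] = T[i-1][c]
--             else:
--                 T[i][c] = max(T[i-1][c],T[i-1][c-A[i-1]]+A[i-1])
--
--     valore = T[n][C]
--     sol = set()
--     i = n
--     while i > 0:
--         if T[i][valore] != T[i-1][valore]:
--             sol.add(i-1)
--             valore -= A[i-1]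
--         i -= 1
--     return T[n][C],sol
-- ===== SOURCE B (Python) =====
-- def riempiDisco(A, C):
--     # Bitset subset-sum: bit s of b is set iff some subset of the items seen so far sums to s (s <= C).
--     full = (1 << (C + 1)) - 1
--     bits = [1]
--     b = 1
--     for a in A:
--         if a <= C:  # an item larger than the capacity can never fit
--             b |= (b << a) & full
--         bits.append(b)
--     best = b.bit_length() - 1
--     sol = set()
--     v = best
--     for i in range(len(A), 0, -1):
--         if not (bits[i - 1] >> v) & 1:
--             sol.add(i - 1)
--             v -= A[i - 1]
--     return best, sol
-- ===== Notes on version B (the rewrite author's own statement) =====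
-- stated objective: alternative
-- what changed: Replaces the full (n+1)x(C+1) max-value DP table by per-prefix bitsets of reachable subset sums (bit s set iff some subset sums to s; the table entry at capacity k equals the greatest set bit <= k), takes the top bit of the final bitset and runs the same descending traceback via bit tests.
import Mathlib
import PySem

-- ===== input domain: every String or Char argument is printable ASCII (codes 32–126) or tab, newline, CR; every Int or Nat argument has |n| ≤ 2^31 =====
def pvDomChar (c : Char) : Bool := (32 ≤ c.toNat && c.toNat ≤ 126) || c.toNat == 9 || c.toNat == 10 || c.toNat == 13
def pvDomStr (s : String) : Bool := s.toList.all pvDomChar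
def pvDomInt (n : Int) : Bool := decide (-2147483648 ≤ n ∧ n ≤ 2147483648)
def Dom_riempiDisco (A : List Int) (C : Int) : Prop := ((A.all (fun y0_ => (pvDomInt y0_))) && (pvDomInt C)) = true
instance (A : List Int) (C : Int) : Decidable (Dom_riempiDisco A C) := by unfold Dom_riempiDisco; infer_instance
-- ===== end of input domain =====

-- B replaces the (n+1)×(C+1) max-value DP table by per-prefix bitsets of reachable subset sums (a different, bit-parallel algorithm; same traceback order).

-- ===== PORT A =====
-- A-side helpers: pvValA is the right-hand side of the inner assignment, pvOuter one pass of the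
-- outer loop, pvTraceA the while loop.
-- pvValA reads T[i-1][c] / T[i-1][c-A[i-1]]: exact where the index is in range; where Python raises
-- IndexError (only outside Pre_) the getD default is returned instead.
def pvValA (prev : Array Int) (a c : Int) : Int :=
  if c < a then prev.getD c.toNat 0
  else max (prev.getD c.toNat 0) (prev.getD (c - a).toNat 0 + a)

-- Python mutates the list T[i] in place, with O(1) cell reads of T[i-1] and A[i-1], which the inner
-- loop never writes; ported with an array buffer for row i and an array copy of row i-1 (same cells,
-- written in the same order), put back into T after the inner loop.
def pvOuter (A : List Int) (C : Int) (T : List (List Int)) (i : Int) : List (List Int) :=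
  PySem.List.pySetD T i
    ((PySem.List.pyRange 0 (C + 1) 1).foldl
      (fun row c => row.setIfInBounds c.toNat
        (pvValA (PySem.List.pyGetD T (i - 1) []).toArray (PySem.List.pyGetD A (i - 1) 0) c))
      (PySem.List.pyGetD T i []).toArray).toList

-- while i > 0: fuel = current i (Python's i is the fuel + …; i-1 of the Python is the Nat index below)
def pvTraceA (A : List Int) (T : List (List Int)) : Nat → Int → PySem.Set Int → Int × PySem.Set Int
  | 0, valore, sol => (valore, sol)
  | i + 1, valore, sol =>
    if PySem.List.pyGetD (PySem.List.pyGetD T ((i : Int) + 1) []) valore 0 ≠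
       PySem.List.pyGetD (PySem.List.pyGetD T (i : Int) []) valore 0 then
      pvTraceA A T i (valore - PySem.List.pyGetD A (i : Int) 0) (PySem.Set.add sol (i : Int))
    else
      pvTraceA A T i valore sol

def riempiDisco (A : List Int) (C : Int) : Int × List Int :=
  let n : Int := A.length
  -- [0]*(C+1): empty when C+1 ≤ 0, exactly Int.toNat
  let T0 : List (List Int) := (PySem.List.pyRange 0 (n + 1) 1).map (fun _ => List.replicate (C + 1).toNat 0)
  let T := (PySem.List.pyRange 1 (n + 1) 1).foldl (fun T i => pvOuter A C T i) T0
  let valore := PySem.List.pyGetD (PySem.List.pyGetD T n []) C 0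
  (PySem.List.pyGetD (PySem.List.pyGetD T n []) C 0, (pvTraceA A T A.length valore PySem.Set.empty).2)

-- ===== PORT B =====
-- B-side helper: the loop body 'if a <= C: b |= (b << a) & full' with full = (1 << (C+1)) - 1.
-- Python's b/full are big ints that stay ≥ 0 here, ported on Nat (bit ops exact); (C+1).toNat matches
-- Python for C ≥ -1, and for C ≤ -2 or a < 0 the Python raises (those inputs are outside Pre_).
def pvStepBits (C : Int) (b : Nat) (a : Int) : Nat :=
  if a ≤ C then b ||| ((b <<< a.toNat) &&& ((1 <<< (C + 1).toNat) - 1)) else b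

def riempiDisco_alt (A : List Int) (C : Int) : Int × List Int :=
  let p := A.foldl (fun (p : List Nat × Nat) a =>
    (p.1 ++ [pvStepBits C p.2 a], pvStepBits C p.2 a)) ([1], 1)
  -- b.bit_length() is Nat.size; q.1 stays ≥ 0 on every input the Python returns on (b >> v raises for v < 0)
  let best : Int := (Nat.size p.2 : Int) - 1
  let q := (PySem.List.pyRange (A.length : Int) 0 (-1)).foldl (fun (q : Int × PySem.Set Int) i =>
    if (PySem.List.pyGetD p.1 (i - 1) 0 >>> q.1.toNat) &&& 1 = 0 then
      (q.1 - PySem.List.pyGetD A (i - 1) 0, PySem.Set.add q.2 (i - 1))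
    else q) (best, PySem.Set.empty)
  (best, q.2)

-- ===== PRECONDITION & SPEC =====
-- Pre_ excludes exactly the inputs on which A raises IndexError: a negative capacity C, or a
-- negative element of A (the read T[i-1][c-A[i-1]] then runs out of the row).
def Pre_riempiDisco (A : List Int) (C : Int) : Prop := 0 ≤ C ∧ ∀ a ∈ A, 0 ≤ a
instance (A : List Int) (C : Int) : Decidable (Pre_riempiDisco A C) := by unfold Pre_riempiDisco; infer_instance
def pvWitness_riempiDisco : List Int × Int := ([1, 2, 3], 4)

def Spec_riempiDisco (A : List Int) (C : Int) (out : Int × List Int) : Prop := out = riempiDisco_alt A C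
instance (A : List Int) (C : Int) (out : Int × List Int) : Decidable (Spec_riempiDisco A C out) := by unfold Spec_riempiDisco; infer_instance

-- ===== CLAIM (what is proved, stated in full; the proofs are below) =====
def Claim_equal_riempiDisco : Prop := ∀ (A : List Int) (C : Int), Dom_riempiDisco A C → Pre_riempiDisco A C → Spec_riempiDisco A C (riempiDisco A C)

-- ===== LEMMAS AND PROOFS =====

-- Mathematical middlemen: row j of A's table, and B's reachable bitset, for each prefix length.
def pvVal (prev : List Int) (a c : Int) : Int :=
  if c < a then PySem.List.pyGetD prev c 0
  else max (PySem.List.pyGetD prev c 0) (PySem.List.pyGetD prev (c - a) 0 + a)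

def pvRow (C : Int) (prev : List Int) (a : Int) : List Int :=
  (List.range (C + 1).toNat).map (fun (k : Nat) =>
    if (k : Int) < a then prev.getD k 0 else max (prev.getD k 0) (prev.getD (k - a.toNat) 0 + a))

def pvRows (A : List Int) (C : Int) (j : Nat) : List Int :=
  (A.take j).foldl (pvRow C) (List.replicate (C + 1).toNat 0)

def pvBits (A : List Int) (C : Int) (j : Nat) : Nat :=
  (A.take j).foldl (pvStepBits C) 1

def pvScan (C : Int) (b : Nat) : List Int → List Nat
  | [] => []
  | a :: l => pvStepBits C b a :: pvScan C (pvStepBits C b a) l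

lemma pvGetD_ofNonneg (xs : List Int) (i : Int) (d : Int) (h : 0 ≤ i) :
    PySem.List.pyGetD xs i d = xs.getD i.toNat d := by
  conv_lhs => rw [← Int.toNat_of_nonneg h]
  rw [PySem.List.pyGetD_natCast]

lemma testBit_one' (i : Nat) : Nat.testBit 1 i = decide (i = 0) := by
  rw [Nat.testBit_eq_decide_div_mod_eq]
  rcases i with _ | i
  · simp
  · have h1 : (1 : Nat) < 2 ^ (i + 1) := Nat.one_lt_two_pow (by omega)
    simp [Nat.div_eq_of_lt h1]

lemma mem_pvStepBits (C : Int) (b : Nat) (a : Int) (s : Nat) :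
    (pvStepBits C b a).testBit s = true ↔
      b.testBit s = true ∨
        (a ≤ C ∧ a.toNat ≤ s ∧ s < (C + 1).toNat ∧ b.testBit (s - a.toNat) = true) := by
  unfold pvStepBits
  by_cases h : a ≤ C
  · rw [if_pos h]
    simp only [Nat.testBit_or, Nat.testBit_and, Nat.testBit_shiftLeft, Nat.one_shiftLeft,
      Nat.testBit_two_pow_sub_one, Bool.or_eq_true, Bool.and_eq_true, decide_eq_true_eq, ge_iff_le]
    tauto
  · rw [if_neg h]
    tauto

lemma le_foldl_bits (C : Int) (hC : 0 ≤ C) : ∀ (l : List Int) (b : Nat),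
    (∀ s : Nat, b.testBit s = true → (s : Int) ≤ C) →
    ∀ s : Nat, (l.foldl (pvStepBits C) b).testBit s = true → (s : Int) ≤ C := by
  intro l
  induction l with
  | nil => intro b h; simpa using h
  | cons a l ih =>
    intro b h
    simp only [List.foldl_cons]
    refine ih _ ?_
    intro s hs
    rcases (mem_pvStepBits C b a s).mp hs with h1 | ⟨_, _, hsC, _⟩
    · exact h s h1
    · omega

lemma pvBits_le (A : List Int) (C : Int) (hC : 0 ≤ C) (j : Nat) :
    ∀ s : Nat, (pvBits A C j).testBit s = true → (s : Int) ≤ C := by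
  unfold pvBits
  refine le_foldl_bits C hC _ _ ?_
  intro s hs
  have : s = 0 := by simpa [testBit_one'] using hs
  omega

lemma pvBits_succ (A : List Int) (C : Int) (j : Nat) (hj : j < A.length) :
    pvBits A C (j + 1) = pvStepBits C (pvBits A C j) A[j] := by
  unfold pvBits
  rw [List.take_add_one, List.getElem?_eq_getElem hj]
  simp only [Option.toList_some, List.foldl_append, List.foldl_cons, List.foldl_nil]

lemma pvRow_length (C : Int) (prev : List Int) (a : Int) : (pvRow C prev a).length = (C + 1).toNat := by
  simp [pvRow]

lemma pvRow_getD (C : Int) (prev : List Int) (a : Int) (k : Nat) (hk : k < (C + 1).toNat) :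
    (pvRow C prev a).getD k 0 =
      if (k : Int) < a then prev.getD k 0 else max (prev.getD k 0) (prev.getD (k - a.toNat) 0 + a) := by
  unfold pvRow
  rw [List.getD_eq_getElem _ _ (by simpa using hk)]
  simp

lemma pvRows_succ (A : List Int) (C : Int) (j : Nat) (hj : j < A.length) :
    pvRows A C (j + 1) = pvRow C (pvRows A C j) A[j] := by
  unfold pvRows
  rw [List.take_add_one, List.getElem?_eq_getElem hj]
  simp only [Option.toList_some, List.foldl_append, List.foldl_cons, List.foldl_nil]

-- The central invariant: the table entry at capacity k is the greatest reachable sum ≤ k,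
-- and the reachable sums are exactly the set bits of B's bitset.
lemma pvMain (A : List Int) (C : Int) (hC : 0 ≤ C) (ha : ∀ x ∈ A, 0 ≤ x) :
    ∀ (j : Nat), j ≤ A.length → ∀ (k : Nat), (k : Int) ≤ C →
      (0 ≤ (pvRows A C j).getD k 0 ∧
        (pvBits A C j).testBit ((pvRows A C j).getD k 0).toNat = true) ∧
      (pvRows A C j).getD k 0 ≤ (k : Int) ∧
      ∀ s : Nat, (pvBits A C j).testBit s = true → (s : Int) ≤ (k : Int) →
        (s : Int) ≤ (pvRows A C j).getD k 0 := by
  intro j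
  induction j with
  | zero =>
    intro _ k hk
    have hkN : k < (C + 1).toNat := by omega
    have hrow : (pvRows A C 0).getD k 0 = 0 := by
      unfold pvRows
      simp only [List.take_zero, List.foldl_nil]
      exact List.getD_replicate 0 hkN
    have hbits : pvBits A C 0 = 1 := rfl
    refine ⟨⟨?_, ?_⟩, ?_, ?_⟩
    · rw [hrow]
    · rw [hrow, hbits]
      rfl
    · rw [hrow]; omega
    · intro s hs hsk
      rw [hbits] at hs
      have : s = 0 := by simpa [testBit_one'] using hs
      rw [hrow]
      omega
  | succ j ih =>
    intro hj1 k hk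
    have hj : j < A.length := by omega
    have ha0 : 0 ≤ A[j] := ha _ (List.getElem_mem hj)
    have hkN : k < (C + 1).toNat := by omega
    rw [pvRows_succ A C j hj, pvBits_succ A C j hj, pvRow_getD C _ _ k hkN]
    obtain ⟨⟨m0, m1⟩, m2, m3⟩ := ih (by omega) k hk
    by_cases hlt : (k : Int) < A[j]
    · rw [if_pos hlt]
      refine ⟨⟨m0, (mem_pvStepBits _ _ _ _).mpr (Or.inl m1)⟩, m2, ?_⟩
      intro s hs hsk
      rcases (mem_pvStepBits _ _ _ _).mp hs with h | ⟨_, has, _, _⟩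
      · exact m3 s h hsk
      · omega
    · rw [if_neg hlt]
      rw [not_lt] at hlt
      obtain ⟨⟨n0, n1⟩, n2, n3⟩ := ih (by omega) (k - A[j].toNat) (by omega)
      have hk' : ((k - A[j].toNat : Nat) : Int) = (k : Int) - A[j] := by omega
      refine ⟨⟨?_, ?_⟩, ?_, ?_⟩
      · exact le_trans m0 (le_max_left _ _)
      · rcases max_choice ((pvRows A C j).getD k 0)
          ((pvRows A C j).getD (k - A[j].toNat) 0 + A[j]) with h | h <;> rw [h]
        · exact (mem_pvStepBits _ _ _ _).mpr (Or.inl m1)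
        · refine (mem_pvStepBits _ _ _ _).mpr (Or.inr ⟨by omega, by omega, by omega, ?_⟩)
          have e : ((pvRows A C j).getD (k - A[j].toNat) 0 + A[j]).toNat - A[j].toNat =
              ((pvRows A C j).getD (k - A[j].toNat) 0).toNat := by omega
          rw [e]
          exact n1
      · exact max_le m2 (by omega)
      · intro s hs hsk
        rcases (mem_pvStepBits _ _ _ _).mp hs with h | ⟨_, has, hsC, hbit⟩
        · exact le_trans (m3 s h hsk) (le_max_left _ _)
        · have h1 : ((s - A[j].toNat : Nat) : Int) ≤ ((k - A[j].toNat : Nat) : Int) := by omega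
          have h2 := n3 (s - A[j].toNat) hbit h1
          exact le_trans (by omega) (le_max_right _ _)

lemma row_eq_iff_bit (A : List Int) (C : Int) (hC : 0 ≤ C) (ha : ∀ x ∈ A, 0 ≤ x)
    (j : Nat) (hj : j ≤ A.length) (v : Int) (h0 : 0 ≤ v) (hvC : v ≤ C) :
    (pvRows A C j).getD v.toNat 0 = v ↔ (pvBits A C j).testBit v.toNat = true := by
  obtain ⟨⟨m0, m1⟩, m2, m3⟩ := pvMain A C hC ha j hj v.toNat (by omega)
  constructor
  · intro h
    rw [h] at m1
    exact m1
  · intro hb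
    have h1 := m3 v.toNat hb (by omega)
    omega

-- ===== A-side: the double fold computes pvRows =====
lemma pvValA_eq (prev : List Int) (a c : Int) (h0c : 0 ≤ c) :
    pvValA prev.toArray a c = pvVal prev a c := by
  have hg : ∀ (n : Nat), prev.toArray.getD n 0 = prev.getD n 0 := by
    intro n
    rw [Array.getD_eq_getD_getElem?, ← Array.getElem?_toList, List.toList_toArray,
      ← List.getD_eq_getElem?_getD]
  unfold pvValA pvVal
  by_cases h : c < a
  · rw [if_pos h, if_pos h, hg, pvGetD_ofNonneg _ _ _ h0c]
  · rw [if_neg h, if_neg h, hg, hg, pvGetD_ofNonneg _ _ _ h0c,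
      pvGetD_ofNonneg _ _ _ (by omega)]

lemma innerArr (prev : Array Int) (a : Int) : ∀ (cs : List Int), (∀ c ∈ cs, 0 ≤ c) →
    ∀ (rowA : Array Int),
      (cs.foldl (fun (row : Array Int) c => row.setIfInBounds c.toNat (pvValA prev a c)) rowA).toList
      = cs.foldl (fun row c => PySem.List.pySetD row c (pvValA prev a c)) rowA.toList := by
  intro cs
  induction cs with
  | nil => intro _ rowA; rfl
  | cons c cs ih =>
    intro h rowA
    simp only [List.foldl_cons]
    rw [ih (fun x hx => h x (List.mem_cons_of_mem _ hx))]
    congr 1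
    rw [Array.toList_setIfInBounds, PySem.List.pySetD_of_nonneg _ _ (h c List.mem_cons_self)]

lemma setFold_length (w : Nat → Int) : ∀ (m : Nat) (row : List Int),
    ((List.range m).foldl (fun r k => r.set k (w k)) row).length = row.length := by
  intro m
  induction m with
  | zero => intro row; rfl
  | succ m ih =>
    intro row
    rw [List.range_succ, List.foldl_append]
    simp only [List.foldl_cons, List.foldl_nil, List.length_set]
    exact ih row

lemma setFold_getD (w : Nat → Int) : ∀ (m : Nat) (row : List Int), m ≤ row.length → ∀ (j : Nat),
    ((List.range m).foldl (fun r k => r.set k (w k)) row).getD j 0 =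
      if j < m then w j else row.getD j 0 := by
  intro m
  induction m with
  | zero => intro row _ j; simp
  | succ m ih =>
    intro row hm j
    rw [List.range_succ, List.foldl_append]
    simp only [List.foldl_cons, List.foldl_nil]
    have hFlen : ((List.range m).foldl (fun r k => r.set k (w k)) row).length = row.length :=
      setFold_length w m row
    by_cases hj : j = m
    · subst hj
      rw [List.getD_eq_getElem?_getD, List.getElem?_set_self (by omega), if_pos (by omega)]
      rfl
    · rw [List.getD_eq_getElem?_getD, List.getElem?_set_ne (fun h => hj h.symm),
        ← List.getD_eq_getElem?_getD, ih row (by omega) j]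
      by_cases hjm : j < m
      · rw [if_pos hjm, if_pos (by omega)]
      · rw [if_neg hjm, if_neg (by omega)]

lemma rowFold_eq (C : Int) (prev : List Int) (a : Int) (h0a : 0 ≤ a) (row : List Int)
    (hrow : row.length = (C + 1).toNat) :
    (PySem.List.pyRange 0 (C + 1) 1).foldl (fun row c => PySem.List.pySetD row c (pvVal prev a c)) row =
      pvRow C prev a := by
  rw [PySem.List.pyRange_one, List.foldl_map]
  simp only [zero_add, PySem.List.pySetD_natCast, Int.sub_zero]
  have hlen1 : ((List.range (C + 1).toNat).foldl (fun r (k : Nat) => r.set k (pvVal prev a (k : Int))) row).length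
      = (C + 1).toNat := by
    rw [setFold_length]; exact hrow
  apply List.ext_getElem (by rw [hlen1, pvRow_length])
  intro n h1 h2
  rw [← List.getD_eq_getElem _ 0 h1, ← List.getD_eq_getElem _ 0 h2]
  have hn : n < (C + 1).toNat := by omega
  rw [setFold_getD _ _ _ (le_of_eq hrow.symm) n, if_pos hn, pvRow_getD C prev a n hn]
  unfold pvVal
  by_cases hc : ((n : Nat) : Int) < a
  · simp [hc]
  · have e : ((n : Int) - a) = ((n - a.toNat : Nat) : Int) := by omega
    simp [hc, e]

lemma outer_fold (A : List Int) (C : Int) (ha : ∀ x ∈ A, 0 ≤ x) :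
    ∀ (d j : Nat) (T : List (List Int)), j + d = A.length →
      T.length = A.length + 1 →
      (∀ t : Nat, t ≤ A.length → PySem.List.pyGetD T (t : Int) [] =
        if t ≤ j then pvRows A C t else List.replicate (C + 1).toNat 0) →
      ∀ t : Nat, t ≤ A.length →
        PySem.List.pyGetD
          ((PySem.List.pyRange ((j : Int) + 1) ((A.length : Int) + 1) 1).foldl (fun T i => pvOuter A C T i) T)
          (t : Int) [] = pvRows A C t := by
  intro d
  induction d with
  | zero =>
    intro j T hjd hlen hinv t ht
    rw [PySem.List.pyRange_one_eq_nil (by omega)]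
    simp only [List.foldl_nil]
    rw [hinv t ht, if_pos (by omega)]
  | succ d ihd =>
    intro j T hjd hlen hinv t ht
    have hjlt : j < A.length := by omega
    rw [PySem.List.pyRange_one_cons (by omega : (j : Int) + 1 < (A.length : Int) + 1)]
    simp only [List.foldl_cons]
    have hiT : j + 1 < T.length := by omega
    have e1 : ((j : Int) + 1) = ((j + 1 : Nat) : Int) := by omega
    have hprev : PySem.List.pyGetD T (((j + 1 : Nat) : Int) - 1) [] = pvRows A C j := by
      have e : (((j + 1 : Nat) : Int) - 1) = ((j : Nat) : Int) := by omega
      rw [e, hinv j (by omega), if_pos (le_refl j)]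
    have haj : PySem.List.pyGetD A (((j + 1 : Nat) : Int) - 1) 0 = A[j] := by
      have e : (((j + 1 : Nat) : Int) - 1) = ((j : Nat) : Int) := by omega
      rw [e, PySem.List.pyGetD_natCast, List.getD_eq_getElem _ _ hjlt]
    have hrowi : PySem.List.pyGetD T ((j + 1 : Nat) : Int) [] = List.replicate (C + 1).toNat 0 := by
      rw [hinv (j + 1) (by omega), if_neg (by omega)]
    have ha0 : 0 ≤ A[j] := ha _ (List.getElem_mem hjlt)
    have step : pvOuter A C T ((j : Int) + 1) = PySem.List.pySetD T ((j + 1 : Nat) : Int) (pvRows A C (j + 1)) := by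
      unfold pvOuter
      rw [e1, hprev, haj, hrowi,
        innerArr _ _ _ (fun c hc => by have := (PySem.List.mem_pyRange_one).mp hc; omega) _,
        List.toList_toArray,
        PySem.List.foldl_congr_mem _ _
          (fun row c => PySem.List.pySetD row c (pvVal (pvRows A C j) A[j] c)) _
          (fun acc c hc => by
            have := (PySem.List.mem_pyRange_one).mp hc
            rw [pvValA_eq _ _ _ (by omega)]),
        rowFold_eq C (pvRows A C j) A[j] ha0 _ (by simp),
        ← pvRows_succ A C j hjlt]
    rw [step]
    have e2 : ((j : Int) + 1) + 1 = (((j + 1 : Nat) : Int)) + 1 := by omega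
    rw [e2]
    refine ihd (j + 1) _ (by omega) (by rw [PySem.List.length_pySetD]; exact hlen) ?_ t ht
    intro t' ht'
    rw [PySem.List.pySetD_natCast]
    by_cases hte : t' = j + 1
    · subst hte
      rw [PySem.List.pyGetD_natCast, List.getD_eq_getElem?_getD,
        List.getElem?_set_self (by omega), if_pos (le_refl _)]
      rfl
    · rw [PySem.List.pyGetD_natCast, List.getD_eq_getElem?_getD,
        List.getElem?_set_ne (fun h => hte h.symm), ← List.getD_eq_getElem?_getD,
        ← PySem.List.pyGetD_natCast, hinv t' ht']
      by_cases h1 : t' ≤ j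
      · rw [if_pos h1, if_pos (by omega)]
      · rw [if_neg h1, if_neg (by omega)]

lemma table_final (A : List Int) (C : Int) (ha : ∀ x ∈ A, 0 ≤ x) :
    ∀ t : Nat, t ≤ A.length →
      PySem.List.pyGetD
        ((PySem.List.pyRange 1 ((A.length : Int) + 1) 1).foldl (fun T i => pvOuter A C T i)
          ((PySem.List.pyRange 0 ((A.length : Int) + 1) 1).map (fun _ => List.replicate (C + 1).toNat 0)))
        (t : Int) [] = pvRows A C t := by
  intro t ht
  have e1 : PySem.List.pyRange 1 ((A.length : Int) + 1) 1
      = PySem.List.pyRange (((0 : Nat) : Int) + 1) ((A.length : Int) + 1) 1 := by norm_num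
  rw [e1]
  refine outer_fold A C ha A.length 0 _ (by omega) ?_ ?_ t ht
  · simp [PySem.List.length_pyRange_one]
  · intro t' ht'
    rw [PySem.List.pyGetD_map_pyRange_of_nonneg _ _ _ _ (by omega) (by omega)]
    split_ifs with h
    · have : t' = 0 := by omega
      subst this
      rfl
    · rfl

-- ===== B-side: the pair fold computes the prefix bitsets =====
lemma foldB (C : Int) : ∀ (l : List Int) (acc : List Nat) (b : Nat),
    l.foldl (fun (p : List Nat × Nat) a =>
      (p.1 ++ [pvStepBits C p.2 a], pvStepBits C p.2 a)) (acc, b) =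
    (acc ++ pvScan C b l, l.foldl (pvStepBits C) b) := by
  intro l
  induction l with
  | nil => intro acc b; simp [pvScan]
  | cons a l ih =>
    intro acc b
    simp only [List.foldl_cons, pvScan]
    rw [ih]
    simp

lemma pvScan_getD (C : Int) : ∀ (l : List Int) (b : Nat) (j : Nat), j < l.length →
    (pvScan C b l).getD j 0 = (l.take (j + 1)).foldl (pvStepBits C) b := by
  intro l
  induction l with
  | nil => intro b j hj; simp at hj
  | cons a l ih =>
    intro b j hj
    cases j with
    | zero => simp [pvScan]
    | succ j =>
      simp only [pvScan, List.getD_cons_succ, List.take_succ_cons, List.foldl_cons]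
      exact ih _ j (by simpa using hj)

lemma bitsList_getD (A : List Int) (C : Int) (t : Nat) (ht : t ≤ A.length) :
    PySem.List.pyGetD (1 :: pvScan C 1 A) (t : Int) 0 = pvBits A C t := by
  rw [PySem.List.pyGetD_natCast]
  cases t with
  | zero => rfl
  | succ j =>
    rw [List.getD_cons_succ, pvScan_getD C A _ j (by omega)]
    rfl

lemma best_eq (A : List Int) (C : Int) (hC : 0 ≤ C) (ha : ∀ x ∈ A, 0 ≤ x) :
    (Nat.size (pvBits A C A.length) : Int) - 1 = (pvRows A C A.length).getD C.toNat 0 := by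
  obtain ⟨⟨m0, m1⟩, m2, m3⟩ := pvMain A C hC ha A.length le_rfl C.toNat (by omega)
  have hub : ∀ s : Nat, (pvBits A C A.length).testBit s = true →
      s ≤ ((pvRows A C A.length).getD C.toNat 0).toNat := by
    intro s hs
    have h1 := pvBits_le A C hC A.length s hs
    have h2 := m3 s hs (by omega)
    omega
  have hlow : ((pvRows A C A.length).getD C.toNat 0).toNat < Nat.size (pvBits A C A.length) :=
    Nat.lt_size.mpr (Nat.ge_two_pow_of_testBit m1)
  have hhigh : Nat.size (pvBits A C A.length) ≤ ((pvRows A C A.length).getD C.toNat 0).toNat + 1 := by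
    refine Nat.size_le.mpr (Nat.lt_pow_two_of_testBit _ ?_)
    intro i hi
    cases hbit : (pvBits A C A.length).testBit i
    · rfl
    · exact absurd (hub i hbit) (by omega)
  omega

lemma shift_and_one (b v : Nat) : ((b >>> v) &&& 1 = 0) ↔ b.testBit v = false := by
  rw [Nat.and_one_is_mod, Nat.shiftRight_eq_div_pow, Nat.testBit_eq_decide_div_mod_eq]
  simp only [decide_eq_false_iff_not]
  omega

lemma trace_eq (A : List Int) (C : Int) (hC : 0 ≤ C) (ha : ∀ x ∈ A, 0 ≤ x)
    (T : List (List Int)) (bitsL : List Nat)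
    (HT : ∀ t : Nat, t ≤ A.length → PySem.List.pyGetD T (t : Int) [] = pvRows A C t)
    (HB : ∀ t : Nat, t ≤ A.length → PySem.List.pyGetD bitsL (t : Int) 0 = pvBits A C t) :
    ∀ (k : Nat), k ≤ A.length → ∀ (v : Int) (sol : PySem.Set Int),
      (pvBits A C k).testBit v.toNat = true → 0 ≤ v → v ≤ C →
      pvTraceA A T k v sol =
      (PySem.List.pyRange (k : Int) 0 (-1)).foldl (fun (q : Int × PySem.Set Int) i =>
        if (PySem.List.pyGetD bitsL (i - 1) 0 >>> q.1.toNat) &&& 1 = 0 then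
          (q.1 - PySem.List.pyGetD A (i - 1) 0, PySem.Set.add q.2 (i - 1))
        else q) (v, sol) := by
  intro k
  induction k with
  | zero =>
    intro _ v sol _ _ _
    simp only [Nat.cast_zero]
    rw [PySem.List.pyRange_neg_one_eq_nil le_rfl]
    rfl
  | succ k ih =>
    intro hk1 v sol hv hv0 hvC
    have hk : k ≤ A.length := by omega
    have hkA : k < A.length := by omega
    rw [PySem.List.pyRange_neg_one_cons (by omega : (0 : Int) < ((k + 1 : Nat) : Int))]
    simp only [List.foldl_cons]
    have e1 : ((k + 1 : Nat) : Int) - 1 = ((k : Nat) : Int) := by omega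
    rw [e1, HB k hk]
    show (if PySem.List.pyGetD (PySem.List.pyGetD T ((k : Int) + 1) []) v 0 ≠
            PySem.List.pyGetD (PySem.List.pyGetD T (k : Int) []) v 0 then
          pvTraceA A T k (v - PySem.List.pyGetD A (k : Int) 0) (PySem.Set.add sol (k : Int))
        else pvTraceA A T k v sol) = _
    have e2 : ((k : Int) + 1) = ((k + 1 : Nat) : Int) := by omega
    rw [e2, HT (k + 1) hk1, HT k hk]
    have hvt : ((v.toNat : Nat) : Int) = v := Int.toNat_of_nonneg hv0
    have hA1 : PySem.List.pyGetD (pvRows A C (k + 1)) v 0 = v := by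
      rw [← hvt, PySem.List.pyGetD_natCast, hvt]
      exact (row_eq_iff_bit A C hC ha (k + 1) hk1 v hv0 hvC).mpr hv
    have hA2 : PySem.List.pyGetD (pvRows A C k) v 0 = (pvRows A C k).getD v.toNat 0 := by
      conv_lhs => rw [← hvt]
      rw [PySem.List.pyGetD_natCast]
    by_cases hbit0 : (pvBits A C k).testBit v.toNat = true
    · have hAeq : PySem.List.pyGetD (pvRows A C k) v 0 = v := by
        rw [hA2]
        exact (row_eq_iff_bit A C hC ha k hk v hv0 hvC).mpr hbit0
      rw [if_neg (by rw [hA1, hAeq]; simp)]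
      rw [if_neg (by rw [shift_and_one]; simp [hbit0])]
      exact ih hk v sol hbit0 hv0 hvC
    · have hAneq : PySem.List.pyGetD (pvRows A C k) v 0 ≠ v := by
        rw [hA2]
        intro h
        exact hbit0 ((row_eq_iff_bit A C hC ha k hk v hv0 hvC).mp h)
      rw [if_pos (by rw [hA1]; exact fun h => hAneq h.symm)]
      rw [if_pos ((shift_and_one _ _).mpr (by simpa using hbit0))]
      obtain h | ⟨_, has, hsC, hbit'⟩ :=
        (mem_pvStepBits C (pvBits A C k) A[k] v.toNat).mp (by rw [← pvBits_succ A C k hkA]; exact hv)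
      · exact absurd h hbit0
      · have haA : PySem.List.pyGetD A (k : Int) 0 = A[k] := by
          rw [PySem.List.pyGetD_natCast, List.getD_eq_getElem _ _ hkA]
        rw [haA]
        have ha0 : 0 ≤ A[k] := ha _ (List.getElem_mem hkA)
        have e3 : (v - A[k]).toNat = v.toNat - A[k].toNat := by omega
        have hb' : (pvBits A C k).testBit (v - A[k]).toNat = true := by
          rw [e3]
          exact hbit'
        have hvk0 : 0 ≤ v - A[k] := by omega
        have hvkC : v - A[k] ≤ C := by
          have := pvBits_le A C hC k _ hb'
          omega
        exact ih hk (v - A[k]) (PySem.Set.add sol (k : Int)) hb' hvk0 hvkC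

-- ===== VERDICT (by name: the statement is the Claim_ definition above) =====
theorem riempiDisco_spec : Claim_equal_riempiDisco := by
  unfold Claim_equal_riempiDisco
  intro A C hdom hPre
  obtain ⟨hC, ha⟩ := hPre
  unfold Spec_riempiDisco riempiDisco riempiDisco_alt
  simp only []
  rw [foldB C A [1] 1]
  simp only [List.singleton_append]
  have hbits : A.foldl (pvStepBits C) 1 = pvBits A C A.length := by
    unfold pvBits
    rw [List.take_length]
  rw [hbits]
  have hT := table_final A C ha
  have hval : PySem.List.pyGetD (PySem.List.pyGetD
      ((PySem.List.pyRange 1 ((A.length : Int) + 1) 1).foldl (fun T i => pvOuter A C T i)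
        ((PySem.List.pyRange 0 ((A.length : Int) + 1) 1).map (fun _ => List.replicate (C + 1).toNat 0)))
      ((A.length : Int)) []) C 0 = (pvRows A C A.length).getD C.toNat 0 := by
    rw [hT A.length le_rfl, pvGetD_ofNonneg _ _ _ hC]
  rw [hval, best_eq A C hC ha]
  obtain ⟨⟨m0, m1⟩, m2, m3⟩ := pvMain A C hC ha A.length le_rfl C.toNat (by omega)
  have hmC : (pvRows A C A.length).getD C.toNat 0 ≤ C := by
    have := m2
    omega
  rw [trace_eq A C hC ha _ _ hT (fun t ht => bitsList_getD A C t ht) A.length le_rfl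
    ((pvRows A C A.length).getD C.toNat 0) PySem.Set.empty m1 m0 hmC]
  rfl
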